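-- pv_equiv track=rewrite | github.com/GeorgiiMalishev/Python | buns/mod4/task4.py | get_word_composition
-- ===== SOURCE A (Python) =====
-- def get_word_composition(word):
--     letter_count = {}
--
--     for letter in word:
--         if letter in letter_count:
--             letter_count[letter] += 1
--         else:
--             letter_count[letter] = 1
--
--     composition = {}
--     middle_letter = ''
--
--     for letter, count in letter_count.items():
--         if count % 2 != 0:
--             if middle_letter == '':
--                 middle_letter = letter
--             else:
--                 return None, None
--         composition[letter] = count // 2
--
--     return composition, middle_letter
-- ===== SOURCE B (Python) =====
-- def get_word_composition(word):
--     seen = []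
--     for letter in word:
--         if letter not in seen:
--             seen.append(letter)
--     odds = [letter for letter in seen if word.count(letter) % 2 == 1]
--     if len(odds) > 1:
--         return None, None
--     composition = {letter: word.count(letter) // 2 for letter in seen}
--     return composition, odds[0] if odds else ''
-- ===== Notes on version B (the rewrite author's own statement) =====
-- stated objective: alternative
-- what changed: B drops A's counting dict entirely: it builds the first-occurrence list of letters by membership scans and counts each distinct letter with word.count (one string scan per distinct letter), deriving odds, the middle letter and the halved composition from those counts.
import Mathlib
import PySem

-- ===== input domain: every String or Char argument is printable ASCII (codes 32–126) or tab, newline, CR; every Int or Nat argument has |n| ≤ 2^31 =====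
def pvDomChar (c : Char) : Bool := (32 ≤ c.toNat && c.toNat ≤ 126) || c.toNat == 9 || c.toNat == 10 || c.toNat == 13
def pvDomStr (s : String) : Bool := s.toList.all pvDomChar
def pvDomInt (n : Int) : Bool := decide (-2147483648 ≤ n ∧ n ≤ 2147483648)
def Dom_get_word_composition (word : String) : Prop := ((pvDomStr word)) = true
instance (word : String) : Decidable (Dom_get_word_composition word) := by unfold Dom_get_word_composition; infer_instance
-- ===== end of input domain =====

-- B drops A's counting dict: it dedupes the letters into a first-occurrence list and counts each
-- distinct letter with word.count (one string scan per distinct letter); objective: alternative.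

-- ===== PORT A =====
-- second loop of A: for letter, count in letter_count.items(): ... (early return = (none, none))
def gwcLoop : List (String × Int) → PySem.Dict String Int → String → (Option (List (String × Int))) × Option String
  | [], comp, mid => (some comp.items, some mid)
  | (l, c) :: rest, comp, mid =>
    if PySem.Int.mod c 2 != 0 then
      if mid == "" then gwcLoop rest (comp.insert l (PySem.Int.floordiv c 2)) l
      else (none, none)
    else gwcLoop rest (comp.insert l (PySem.Int.floordiv c 2)) mid

def get_word_composition (word : String) : (Option (List (String × Int))) × Option String :=
  let letter_count := word.toList.foldl
    (fun d ch =>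
      let letter := String.singleton ch
      if d.contains letter then d.modify letter 0 (· + 1) else d.insert letter 1)
    PySem.Dict.empty
  gwcLoop letter_count.items PySem.Dict.empty ""

-- ===== PORT B =====
def get_word_composition_alt (word : String) : (Option (List (String × Int))) × Option String :=
  let seen := word.toList.foldl
    (fun (s : List String) ch =>
      let letter := String.singleton ch
      if s.contains letter then s else s ++ [letter]) []
  let odds := seen.filter (fun letter => PySem.Str.count word letter % 2 == 1)
  if odds.length > 1 then (none, none)
  else
    (some ((seen.foldl
        (fun d letter => d.insert letter (PySem.Int.floordiv (PySem.Str.count word letter : Int) 2))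
        PySem.Dict.empty).items),
     some (match odds with | [] => "" | x :: _ => x))

-- ===== PRECONDITION & SPEC =====
def Spec_get_word_composition (word : String) (out : (Option (List (String × Int))) × Option String) : Prop := out = get_word_composition_alt word
instance (word : String) (out : (Option (List (String × Int))) × Option String) : Decidable (Spec_get_word_composition word out) := by unfold Spec_get_word_composition; infer_instance

-- ===== CLAIM (what is proved, stated in full; the proofs are below) =====
def Claim_equal_get_word_composition : Prop := ∀ (word : String), Dom_get_word_composition word → Spec_get_word_composition word (get_word_composition word)

-- ===== LEMMAS AND PROOFS =====

-- the word's characters as the length-1 strings Python iterates over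
def gwcLetters (word : String) : List String := word.toList.map String.singleton

-- keys of items with odd count, in items order
def gwcOddKeys (items : List (String × Int)) : List String :=
  (items.filter (fun p => !(PySem.Int.mod p.2 2 == 0))).map (·.1)

theorem gwc_countA_fold (l : List Char) (d : PySem.Dict String Int) :
    l.foldl
      (fun d ch =>
        let letter := String.singleton ch
        if d.contains letter then d.modify letter 0 (· + 1) else d.insert letter 1) d
    = (l.map String.singleton).foldl (fun d k => d.modify k 0 (· + 1)) d := by
  induction l generalizing d with
  | nil => rfl
  | cons c t ih =>
    simp only [List.foldl_cons, List.map_cons]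
    rw [ih]
    congr 1
    by_cases h : d.contains (String.singleton c)
    · simp [h]
    · have h' : d.contains (String.singleton c) = false := by simpa using h
      have hm : d.modify (String.singleton c) 0 (· + 1)
          = d.insert (String.singleton c) (d.getD (String.singleton c) 0 + 1) := rfl
      simp [h', hm, PySem.Dict.getD_of_not_contains d 0 h']

theorem gwc_countA_eq (word : String) :
    word.toList.foldl
      (fun d ch =>
        let letter := String.singleton ch
        if d.contains letter then d.modify letter 0 (· + 1) else d.insert letter 1)
      PySem.Dict.empty = PySem.Dict.counter (gwcLetters word) := by
  rw [gwc_countA_fold, PySem.Dict.counter_eq_foldl]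
  rfl

-- B's seen-list loop is set(dict.fromkeys) in first-occurrence order
theorem gwc_seen_eq (word : String) :
    word.toList.foldl
      (fun (s : List String) ch =>
        let letter := String.singleton ch
        if s.contains letter then s else s ++ [letter]) []
    = PySem.Set.ofList (gwcLetters word) := by
  have h : word.toList.foldl
      (fun (s : List String) ch =>
        let letter := String.singleton ch
        if s.contains letter then s else s ++ [letter]) []
      = word.toList.foldl (fun (s : PySem.Set String) ch => s.add (String.singleton ch)) [] := rfl
  rw [h, ← PySem.Set.update_map_eq_foldl_add, PySem.Set.update_nil_left]
  rfl

-- word.count of a single character is the character count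
theorem gwc_countgo_singleton (c : Char) (l : List Char) (fuel acc : Nat) (h : l.length ≤ fuel) :
    PySem.Chars.count.go [c] fuel l acc = acc + l.count c := by
  induction l generalizing fuel acc with
  | nil => cases fuel <;> simp [PySem.Chars.count.go]
  | cons a t ih =>
    cases fuel with
    | zero => simp at h
    | succ n =>
      rw [PySem.Chars.count.go]
      by_cases hp : List.isPrefixOf [c] (a :: t)
      · have hca : c = a := by
          simp [List.isPrefixOf] at hp
          exact hp
        subst hca
        simp only [hp, if_true]
        have : List.drop (List.length [c]) (c :: t) = t := by simp
        rw [this, ih n (acc + 1) (by simpa using h)]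
        simp
        omega
      · have hne : ¬ (c == a) = true := by
          intro hb
          exact hp (by simp [List.isPrefixOf, hb])
        have hne' : a ≠ c := fun e => hne (by simp [e])
        simp only [hp]
        rw [ih n acc (by simpa using Nat.le_of_succ_le_succ h)]
        simp [hne']

theorem gwc_str_count_singleton (word : String) (c : Char) :
    PySem.Str.count word (String.singleton c) = word.toList.count c := by
  rw [PySem.Str.count_eq]
  have : (String.singleton c).toList = [c] := by simp
  rw [this]
  unfold PySem.Chars.count
  simp only [List.isEmpty_cons, if_false, Bool.false_eq_true]
  rw [gwc_countgo_singleton c word.toList word.toList.length 0 le_rfl]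
  simp

theorem gwc_singleton_injective : Function.Injective String.singleton := by
  intro a b h
  have := congrArg String.toList h
  simpa using this

theorem gwc_count_letters (word : String) (c : Char) :
    (gwcLetters word).count (String.singleton c) = word.toList.count c := by
  unfold gwcLetters
  exact List.count_map_of_injective _ _ gwc_singleton_injective c

theorem gwc_str_count_eq_letters_count (word : String) (l : String)
    (hl : l ∈ gwcLetters word) :
    PySem.Str.count word l = (gwcLetters word).count l := by
  simp only [gwcLetters, List.mem_map] at hl
  obtain ⟨c, -, rfl⟩ := hl
  rw [gwc_str_count_singleton, gwc_count_letters]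

-- gwcOddKeys of a keyed map is a filter of the keys
theorem gwc_oddKeys_map (xs : List String) (g : String → Int) :
    gwcOddKeys (xs.map (fun k => (k, g k)))
      = xs.filter (fun k => !(PySem.Int.mod (g k) 2 == 0)) := by
  induction xs with
  | nil => rfl
  | cons a t ih =>
    simp only [List.map_cons, gwcOddKeys, List.filter_cons]
    by_cases h : (!(PySem.Int.mod (g a) 2 == 0)) = true
    · simp only [h, if_true, List.map_cons]
      exact congrArg (a :: ·) ih
    · have h' : (!(PySem.Int.mod (g a) 2 == 0)) = false := by simpa using h
      simp only [h', Bool.false_eq_true, if_false]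
      exact ih

theorem gwc_mod_natCast (n : Nat) : PySem.Int.mod (n : Int) 2 = ((n % 2 : Nat) : Int) := by
  unfold PySem.Int.mod
  rw [Int.fmod_eq_emod]
  push_cast
  rfl

-- the parity tests of the two programs agree
theorem gwc_parity_eq (n : Nat) :
    (n % 2 == 1) = (!(PySem.Int.mod (n : Int) 2 == 0)) := by
  rw [gwc_mod_natCast]
  rcases Nat.mod_two_eq_zero_or_one n with h | h <;> simp [h]

theorem gwcLoop_cons_even (l : String) (c : Int) (rest : List (String × Int))
    (comp : PySem.Dict String Int) (mid : String) (h : PySem.Int.mod c 2 = 0) :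
    gwcLoop ((l, c) :: rest) comp mid
      = gwcLoop rest (comp.insert l (PySem.Int.floordiv c 2)) mid := by
  simp only [gwcLoop]
  rw [h]
  simp

theorem gwcLoop_cons_odd_mid (l : String) (c : Int) (rest : List (String × Int))
    (comp : PySem.Dict String Int) (mid : String) (h : ¬ PySem.Int.mod c 2 = 0)
    (hm : mid ≠ "") :
    gwcLoop ((l, c) :: rest) comp mid = (none, none) := by
  have hb : (PySem.Int.mod c 2 != 0) = true := by simpa using h
  have hm' : (mid == "") = false := by simpa using hm
  simp only [gwcLoop, hb, hm']
  simp

theorem gwcLoop_cons_odd_start (l : String) (c : Int) (rest : List (String × Int))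
    (comp : PySem.Dict String Int) (h : ¬ PySem.Int.mod c 2 = 0) :
    gwcLoop ((l, c) :: rest) comp ""
      = gwcLoop rest (comp.insert l (PySem.Int.floordiv c 2)) l := by
  have hb : (PySem.Int.mod c 2 != 0) = true := by simpa using h
  simp only [gwcLoop, hb]
  simp

theorem gwc_loop_mid (items : List (String × Int)) (comp : PySem.Dict String Int)
    (mid : String) (hm : mid ≠ "") :
    gwcLoop items comp mid =
      if gwcOddKeys items = [] then
        (some ((items.foldl (fun d p => d.insert p.1 (PySem.Int.floordiv p.2 2)) comp).items), some mid)
      else (none, none) := by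
  induction items generalizing comp with
  | nil => simp [gwcLoop, gwcOddKeys]
  | cons p rest ih =>
    obtain ⟨l, c⟩ := p
    by_cases hodd : PySem.Int.mod c 2 = 0
    · have hc : (!(PySem.Int.mod c 2 == 0)) = false := by rw [hodd]; rfl
      have heven : gwcOddKeys ((l, c) :: rest) = gwcOddKeys rest := by
        simp only [gwcOddKeys, List.filter_cons, hc, Bool.false_eq_true, if_false]
      rw [gwcLoop_cons_even l c rest comp mid hodd, ih, heven]
      simp only [List.foldl_cons]
    · have hc : (!(PySem.Int.mod c 2 == 0)) = true := by simpa using hodd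
      have hcons : gwcOddKeys ((l, c) :: rest) = l :: gwcOddKeys rest := by
        simp only [gwcOddKeys, List.filter_cons, hc, if_true, List.map_cons]
      rw [gwcLoop_cons_odd_mid l c rest comp mid hodd hm, hcons, if_neg (by simp)]

theorem gwc_loop_start (items : List (String × Int)) (comp : PySem.Dict String Int)
    (hne : ∀ p ∈ items, p.1 ≠ "") :
    gwcLoop items comp "" =
      match gwcOddKeys items with
      | [] => (some ((items.foldl (fun d p => d.insert p.1 (PySem.Int.floordiv p.2 2)) comp).items), some "")
      | [x] => (some ((items.foldl (fun d p => d.insert p.1 (PySem.Int.floordiv p.2 2)) comp).items), some x)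
      | _ => (none, none) := by
  induction items generalizing comp with
  | nil => simp [gwcLoop, gwcOddKeys]
  | cons p rest ih =>
    obtain ⟨l, c⟩ := p
    by_cases hodd : PySem.Int.mod c 2 = 0
    · have hc : (!(PySem.Int.mod c 2 == 0)) = false := by rw [hodd]; rfl
      have heven : gwcOddKeys ((l, c) :: rest) = gwcOddKeys rest := by
        simp only [gwcOddKeys, List.filter_cons, hc, Bool.false_eq_true, if_false]
      rw [gwcLoop_cons_even l c rest comp "" hodd,
        ih _ (fun q hq => hne q (List.mem_cons_of_mem _ hq)), heven]
      simp only [List.foldl_cons]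
    · have hl : l ≠ "" := hne (l, c) List.mem_cons_self
      have hc : (!(PySem.Int.mod c 2 == 0)) = true := by simpa using hodd
      have hcons : gwcOddKeys ((l, c) :: rest) = l :: gwcOddKeys rest := by
        simp only [gwcOddKeys, List.filter_cons, hc, if_true, List.map_cons]
      rw [gwcLoop_cons_odd_start l c rest comp hodd, gwc_loop_mid _ _ _ hl, hcons]
      cases h : gwcOddKeys rest with
      | nil => simp
      | cons y ys => simp

-- ===== VERDICT (by name: the statement is the Claim_ definition above) =====
theorem get_word_composition_spec : Claim_equal_get_word_composition := by
  intro word _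
  show get_word_composition word = get_word_composition_alt word
  have hL0 : ∀ x ∈ gwcLetters word, x ≠ "" := by
    intro x hx
    simp only [gwcLetters, List.mem_map] at hx
    obtain ⟨c, -, rfl⟩ := hx
    intro h
    have h2 := congrArg String.length h
    simp at h2
  have hitems : (PySem.Dict.counter (gwcLetters word)).items
      = (PySem.Set.ofList (gwcLetters word)).map
          (fun k => (k, ((gwcLetters word).count k : Int))) :=
    PySem.Dict.items_counter _
  have hkeysnd : ((PySem.Dict.counter (gwcLetters word)).items.map (·.1)).Nodup := by
    have h := PySem.Dict.nodup_keys_counter (gwcLetters word)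
    simpa [PySem.Dict.keys] using h
  have hne : ∀ p ∈ (PySem.Dict.counter (gwcLetters word)).items, p.1 ≠ "" := by
    intro p hp
    rw [hitems] at hp
    simp only [List.mem_map] at hp
    obtain ⟨k, hk, rfl⟩ := hp
    exact hL0 k ((PySem.Set.mem_ofList _ k).mp hk)
  -- A's composition items
  have hfoldA : (((PySem.Dict.counter (gwcLetters word)).items).foldl
        (fun d p => d.insert p.1 (PySem.Int.floordiv p.2 2)) PySem.Dict.empty).items
      = ((PySem.Dict.counter (gwcLetters word)).items).map
          (fun p => (p.1, PySem.Int.floordiv p.2 2)) := by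
    have h := PySem.Dict.items_foldl_insert_fresh
      ((PySem.Dict.counter (gwcLetters word)).items) Prod.fst
      (fun p => PySem.Int.floordiv p.2 2) PySem.Dict.empty
      (fun a _ => by simp) hkeysnd
    simpa using h
  -- B's composition items
  have hsnd : (PySem.Set.ofList (gwcLetters word)).Nodup := PySem.Set.nodup_ofList _
  have hfoldB : ((PySem.Set.ofList (gwcLetters word)).foldl
        (fun d letter => d.insert letter
          (PySem.Int.floordiv (PySem.Str.count word letter : Int) 2)) PySem.Dict.empty).items
      = (PySem.Set.ofList (gwcLetters word)).map
          (fun l => (l, PySem.Int.floordiv (PySem.Str.count word l : Int) 2)) := by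
    have h := PySem.Dict.items_foldl_insert_fresh
      (PySem.Set.ofList (gwcLetters word)) id
      (fun l => PySem.Int.floordiv (PySem.Str.count word l : Int) 2) PySem.Dict.empty
      (fun a _ => by simp) (by simp [hsnd])
    simpa using h
  -- the two composition item lists agree
  have hcompEq : ((PySem.Dict.counter (gwcLetters word)).items).map
        (fun p => (p.1, PySem.Int.floordiv p.2 2))
      = (PySem.Set.ofList (gwcLetters word)).map
          (fun l => (l, PySem.Int.floordiv (PySem.Str.count word l : Int) 2)) := by
    rw [hitems, List.map_map]
    refine List.map_congr_left ?_
    intro l hl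
    have hc := gwc_str_count_eq_letters_count word l ((PySem.Set.mem_ofList _ l).mp hl)
    simp only [Function.comp]
    rw [hc]
  -- the odd-letter lists agree
  have hoddEq : gwcOddKeys ((PySem.Dict.counter (gwcLetters word)).items)
      = (PySem.Set.ofList (gwcLetters word)).filter
          (fun letter => PySem.Str.count word letter % 2 == 1) := by
    rw [hitems, gwc_oddKeys_map]
    refine List.filter_congr ?_
    intro l hl
    have hc := gwc_str_count_eq_letters_count word l ((PySem.Set.mem_ofList _ l).mp hl)
    rw [hc, gwc_parity_eq]
  simp only [get_word_composition, get_word_composition_alt]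
  rw [gwc_countA_eq word, gwc_seen_eq word, gwc_loop_start _ _ hne, ← hoddEq, hfoldB,
    ← hcompEq, ← hfoldA]
  cases hcase : gwcOddKeys (PySem.Dict.counter (gwcLetters word)).items with
  | nil => simp
  | cons x t =>
    cases t with
    | nil => simp
    | cons y ys =>
      rw [if_pos (by simp)]
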